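-- pv_equiv track=rewrite | github.com/artmerinov/unibz_data_profiling | apriori_ucc/pli.py | pli_intersection_optimized
-- ===== SOURCE A (Python) =====
-- from collections import defaultdict
--
-- def create_probing_table(pli):
--     """
--     Creates mapping bewtween index and group number.
--     """
--     probing_table = {}
--
--     for gr_index, group in pli.items():
--         for index in group:
--             probing_table[index] = gr_index
--
--     return probing_table
--
-- def pli_intersection_optimized(pli1, pli2):
--     intersection = defaultdict(list)
--
--     # create a probing table for pli1
--     pt1 = create_probing_table(pli1)
--
--     # check for common indices in pli2 using the probing table of pli1
--     for gr2_index, gr2_values in pli2.items():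
--         for v in gr2_values:
--             if v in pt1:
--                 gr1_index = pt1[v]
--                 intersection[(gr1_index, gr2_index)].append(v)
--
--     # remove singletons
--     intersection = {k: v for k, v in intersection.items() if len(v) > 1}
--
--     return intersection
-- ===== SOURCE B (Python) =====
-- def pli_intersection_optimized(pli1, pli2):
--     # map each index to the group of pli1 that contains it
--     owner = {v: g for g, vals in pli1.items() for v in vals}
--
--     result = {}
--     for g2, vals2 in pli2.items():
--         # distinct owner groups of this pli2 group's indices, in order of first occurrence
--         labels = []
--         for v in vals2:
--             g = owner.get(v)
--             if g is not None and g not in labels: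
--                 labels.append(g)
--         for g1 in labels:
--             common = [v for v in vals2 if owner.get(v) == g1]
--             if len(common) > 1:
--                 result[(g1, g2)] = common
--     return result
-- ===== Notes on version B (the rewrite author's own statement) =====
-- stated objective: alternative
-- what changed: B drops A's defaultdict accumulation pass and singleton-removal comprehension: it builds the value-to-group map as a dict comprehension, then per pli2 group collects the distinct owner labels in first-occurrence order and rebuilds each intersection cell by one filtering pass per label, inserting only cells with more than one value; Pre_ (Lean level only) excludes association lists with duplicate group keys, which represent no Python dict.
import Mathlib
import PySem

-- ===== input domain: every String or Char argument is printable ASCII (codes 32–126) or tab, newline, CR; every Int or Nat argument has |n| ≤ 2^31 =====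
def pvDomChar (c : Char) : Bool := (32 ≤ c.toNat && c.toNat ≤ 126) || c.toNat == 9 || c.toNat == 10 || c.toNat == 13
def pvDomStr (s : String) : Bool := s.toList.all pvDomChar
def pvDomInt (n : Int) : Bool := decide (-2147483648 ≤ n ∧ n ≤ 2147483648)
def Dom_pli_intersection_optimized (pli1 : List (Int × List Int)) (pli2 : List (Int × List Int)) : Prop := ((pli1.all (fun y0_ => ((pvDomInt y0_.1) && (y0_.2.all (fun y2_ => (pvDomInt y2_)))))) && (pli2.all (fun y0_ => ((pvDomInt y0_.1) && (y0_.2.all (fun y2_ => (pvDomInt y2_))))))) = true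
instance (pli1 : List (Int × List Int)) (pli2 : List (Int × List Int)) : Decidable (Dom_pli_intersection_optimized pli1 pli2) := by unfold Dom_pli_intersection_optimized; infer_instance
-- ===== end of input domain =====

-- B replaces A's probing-table dict + single accumulating pass by, per pli2 group, a
-- first-occurrence label list and one filtering pass per label (objective: alternative, not faster).

-- ===== PORT A =====
def createProbingTable (pli : List (Int × List Int)) : PySem.Dict Int Int :=
  pli.foldl (fun pt p => p.2.foldl (fun pt idx => pt.insert idx p.1) pt) PySem.Dict.empty

def pli_intersection_optimized (pli1 : List (Int × List Int)) (pli2 : List (Int × List Int)) : List (Int × Int × List Int) :=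
  let pt1 := createProbingTable pli1
  let inter : PySem.Dict (Int × Int) (List Int) :=
    pli2.foldl (fun d p =>
      p.2.foldl (fun d v =>
        match pt1.get? v with
        | some g1 => d.modify (g1, p.1) [] (fun x => x ++ [v])
        | none => d) d) PySem.Dict.empty
  (inter.items.filter (fun kv => kv.2.length > 1)).map (fun kv => (kv.1.1, kv.1.2, kv.2))

-- ===== PORT B =====
-- Source B's owner dict comprehension {v: g for g, vals in pli1.items() for v in vals}
def ownerDict (pli1 : List (Int × List Int)) : PySem.Dict Int Int :=
  pli1.foldl (fun d p => p.2.foldl (fun d v => d.insert v p.1) d) PySem.Dict.empty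

-- owner.get(v)
def ownerB (pli1 : List (Int × List Int)) (v : Int) : Option Int :=
  (ownerDict pli1).get? v

def pli_intersection_optimized_alt (pli1 : List (Int × List Int)) (pli2 : List (Int × List Int)) : List (Int × Int × List Int) :=
  let result : PySem.Dict (Int × Int) (List Int) :=
    pli2.foldl (fun res p =>
      let labels : List Int := p.2.foldl (fun ls v =>
        match ownerB pli1 v with
        | some g1 => if g1 ∈ ls then ls else ls ++ [g1]
        | none => ls) []
      labels.foldl (fun res g1 =>
        let common := p.2.filter (fun v => ownerB pli1 v == some g1)
        if common.length > 1 then res.insert (g1, p.1) common else res) res) PySem.Dict.empty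
  result.items.map (fun kv => (kv.1.1, kv.1.2, kv.2))

-- ===== PRECONDITION & SPEC =====
-- The Python arguments are dicts, whose keys are necessarily distinct; Pre_ only rules out
-- association lists with duplicate group keys, which represent no Python input.
def Pre_pli_intersection_optimized (pli1 : List (Int × List Int)) (pli2 : List (Int × List Int)) : Prop :=
  (pli1.map Prod.fst).Nodup ∧ (pli2.map Prod.fst).Nodup
instance (pli1 : List (Int × List Int)) (pli2 : List (Int × List Int)) : Decidable (Pre_pli_intersection_optimized pli1 pli2) := by unfold Pre_pli_intersection_optimized; infer_instance

def pvWitness_pli_intersection_optimized : (List (Int × List Int)) × (List (Int × List Int)) :=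
  ([(0, [1, 2, 3]), (1, [4, 5])], [(0, [1, 2, 4]), (1, [3, 5])])

def Spec_pli_intersection_optimized (pli1 : List (Int × List Int)) (pli2 : List (Int × List Int)) (out : List (Int × Int × List Int)) : Prop := out = pli_intersection_optimized_alt pli1 pli2
instance (pli1 : List (Int × List Int)) (pli2 : List (Int × List Int)) (out : List (Int × Int × List Int)) : Decidable (Spec_pli_intersection_optimized pli1 pli2 out) := by unfold Spec_pli_intersection_optimized; infer_instance

-- ===== CLAIM (what is proved, stated in full; the proofs are below) =====
def Claim_equal_pli_intersection_optimized : Prop := ∀ (pli1 : List (Int × List Int)) (pli2 : List (Int × List Int)), Dom_pli_intersection_optimized pli1 pli2 → Pre_pli_intersection_optimized pli1 pli2 → Spec_pli_intersection_optimized pli1 pli2 (pli_intersection_optimized pli1 pli2)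

-- ===== LEMMAS AND PROOFS =====

-- the per-group list of (key, value) pairs A's accumulating loop feeds to its dict
def pairsOf (ow : Int → Option Int) (p : Int × List Int) : List ((Int × Int) × Int) :=
  p.2.filterMap (fun v => (ow v).map (fun g => ((g, p.1), v)))

-- B's per-group label list, as a PySem set
def labelsOf (ow : Int → Option Int) (vals : List Int) : List Int :=
  PySem.Set.ofList (vals.filterMap ow)

-- B's per-group contribution to the result
def blockOf (ow : Int → Option Int) (p : Int × List Int) : List ((Int × Int) × List Int) :=
  (labelsOf ow p.2).filterMap (fun g1 =>
    let common := p.2.filter (fun v => ow v == some g1)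
    if common.length > 1 then some ((g1, p.1), common) else none)

-- a fold whose body dispatches on an Option is a fold over the filterMap
theorem foldl_opt {α β γ : Type} (l : List α) (h : α → Option β) (g : γ → β → γ) (init : γ) :
    l.foldl (fun acc x => match h x with | some y => g acc y | none => acc) init
      = (l.filterMap h).foldl g init := by
  induction l generalizing init with
  | nil => rfl
  | cons x xs ih =>
    simp only [List.foldl_cons, List.filterMap_cons]
    cases hx : h x <;> simp [ih]

theorem a_inter_eq (pli1 pli2 : List (Int × List Int)) (pt : PySem.Dict Int Int)
    (hpt : ∀ v, pt.get? v = ownerB pli1 v) :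
    pli2.foldl (fun d p =>
      p.2.foldl (fun d v =>
        match pt.get? v with
        | some g1 => d.modify (g1, p.1) [] (fun x => x ++ [v])
        | none => d) d) PySem.Dict.empty
    = (pli2.flatMap (pairsOf (ownerB pli1))).foldl
        (fun d q => d.modify q.1 [] (fun x => x ++ [q.2])) PySem.Dict.empty := by
  rw [List.flatMap_def, List.foldl_flatten, List.foldl_map]
  apply PySem.List.foldl_congr_mem'
  intro p _ d
  unfold pairsOf
  have h2 := foldl_opt p.2 (fun x => (ownerB pli1 x).map (fun g => ((g, p.1), x)))
    (fun d q => d.modify q.1 [] (fun x => x ++ [q.2])) d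
  refine Eq.trans ?_ h2
  apply PySem.List.foldl_congr_mem'
  intro v _ acc
  rw [hpt v]
  cases hov : ownerB pli1 v <;> rfl

theorem labels_eq (pli1 : List (Int × List Int)) (vals : List Int) :
    vals.foldl (fun ls v =>
        match ownerB pli1 v with
        | some g1 => if g1 ∈ ls then ls else ls ++ [g1]
        | none => ls) []
      = labelsOf (ownerB pli1) vals := by
  unfold labelsOf
  rw [PySem.Set.ofList_eq_foldl]
  have h2 := foldl_opt vals (ownerB pli1) (fun ls g1 => if g1 ∈ ls then ls else ls ++ [g1]) []
  refine Eq.trans (Eq.trans ?_ h2) ?_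
  · apply PySem.List.foldl_congr_mem'
    intro v _ ls
    cases hov : ownerB pli1 v <;> rfl
  · apply PySem.List.foldl_congr_mem'
    intro g _ ls
    rw [PySem.Set.add_eq_ite]

theorem b_result_eq (pli1 pli2 : List (Int × List Int)) :
    pli2.foldl (fun res p =>
      let labels : List Int := p.2.foldl (fun ls v =>
        match ownerB pli1 v with
        | some g1 => if g1 ∈ ls then ls else ls ++ [g1]
        | none => ls) []
      labels.foldl (fun res g1 =>
        let common := p.2.filter (fun v => ownerB pli1 v == some g1)
        if common.length > 1 then res.insert (g1, p.1) common else res) res) PySem.Dict.empty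
    = (pli2.flatMap (blockOf (ownerB pli1))).foldl
        (fun r e => r.insert e.1 e.2) PySem.Dict.empty := by
  rw [List.flatMap_def, List.foldl_flatten, List.foldl_map]
  apply PySem.List.foldl_congr_mem'
  intro p _ res
  simp only [labels_eq]
  unfold blockOf
  have h2 := foldl_opt (labelsOf (ownerB pli1) p.2)
    (fun g1 => if (p.2.filter (fun v => ownerB pli1 v == some g1)).length > 1
               then some ((g1, p.1), p.2.filter (fun v => ownerB pli1 v == some g1)) else none)
    (fun (r : PySem.Dict (Int × Int) (List Int)) e => r.insert e.1 e.2) res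
  refine Eq.trans ?_ h2
  apply PySem.List.foldl_congr_mem'
  intro g1 _ acc
  by_cases hc : (p.2.filter (fun v => ownerB pli1 v == some g1)).length > 1 <;> simp [hc]

theorem pairsOf_keys (ow : Int → Option Int) (p : Int × List Int) :
    (pairsOf ow p).map Prod.fst = (p.2.filterMap ow).map (fun g => (g, p.1)) := by
  unfold pairsOf
  induction p.2 with
  | nil => rfl
  | cons v vs ih =>
    simp only [List.filterMap_cons]
    cases hov : ow v <;> simp [ih]

theorem pairsOf_filter (ow : Int → Option Int) (p : Int × List Int) (g : Int) :
    ((pairsOf ow p).filter (fun q => q.1 == (g, p.1))).map (fun x => x.2)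
      = p.2.filter (fun v => ow v == some g) := by
  unfold pairsOf
  induction p.2 with
  | nil => rfl
  | cons v vs ih =>
    simp only [List.filterMap_cons, List.filter_cons]
    cases hov : ow v with
    | none => simpa [hov] using ih
    | some g' =>
      by_cases hg : g' = g
      · subst hg; simpa [hov] using congrArg (List.cons v) ih
      · simpa [hov, hg, Prod.ext_iff] using ih

theorem pairsOf_filter_ne (ow : Int → Option Int) (p : Int × List Int) (k : Int × Int)
    (hk : k.2 ≠ p.1) : (pairsOf ow p).filter (fun q => q.1 == k) = [] := by
  unfold pairsOf
  induction p.2 with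
  | nil => rfl
  | cons v vs ih =>
    simp only [List.filterMap_cons]
    cases hov : ow v with
    | none => exact ih
    | some g' =>
      have : (((g', p.1), v).1 == k) = false := by
        rw [beq_eq_false_iff_ne]
        intro h
        exact hk (by rw [← h])
      rw [Option.map_some, List.filter_cons, this]
      simpa using ih

theorem ofList_map_inj {α β : Type} [BEq α] [LawfulBEq α] [BEq β] [LawfulBEq β] (f : α → β)
    (hf : Function.Injective f) (l : List α) :
    PySem.Set.ofList (l.map f) = (PySem.Set.ofList l).map f := by
  induction l with
  | nil => rfl
  | cons x xs ih =>
    rw [List.map_cons, PySem.Set.ofList_cons, PySem.Set.ofList_cons, ih]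
    unfold PySem.Set.discard
    rw [List.map_cons, List.filter_map]
    congr 1
    apply congrArg
    apply List.filter_congr
    intro y _
    simp only [Function.comp_apply]
    by_cases h : y = x <;> simp [h, hf.eq_iff]

theorem mem_pairs_key_snd (ow : Int → Option Int) (p : Int × List Int) (k : Int × Int)
    (hk : k ∈ (pairsOf ow p).map Prod.fst) : k.2 = p.1 := by
  rw [pairsOf_keys] at hk
  simp only [List.mem_map] at hk
  obtain ⟨g, -, rfl⟩ := hk
  rfl

theorem mem_flat_key_snd (ow : Int → Option Int) (pli2 : List (Int × List Int)) (k : Int × Int)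
    (hk : k ∈ (pli2.flatMap (pairsOf ow)).map Prod.fst) : k.2 ∈ pli2.map Prod.fst := by
  simp only [List.map_flatMap, List.mem_flatMap] at hk
  obtain ⟨p, hp, hkp⟩ := hk
  have := mem_pairs_key_snd ow p k hkp
  rw [this]
  exact List.mem_map_of_mem hp

theorem filter_map_eq_filterMap {α β : Type} (l : List α) (f : α → β) (p : β → Bool) :
    (l.map f).filter p = l.filterMap (fun x => if p (f x) then some (f x) else none) := by
  induction l with
  | nil => rfl
  | cons x xs ih =>
    simp only [List.map_cons, List.filter_cons, List.filterMap_cons]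
    by_cases h : p (f x) <;> simp [h, ih]

theorem head_block (ow : Int → Option Int) (p : Int × List Int) :
    ((PySem.Set.ofList ((pairsOf ow p).map Prod.fst)).map
        (fun k => (k, ((pairsOf ow p).filter (fun q => q.1 == k)).map (fun x => x.2)))).filter
      (fun kv => kv.2.length > 1)
    = blockOf ow p := by
  rw [pairsOf_keys, ofList_map_inj (fun g => (g, p.1)) (fun a b h => by simpa using (Prod.ext_iff.mp h).1)]
  rw [List.map_map]
  rw [filter_map_eq_filterMap]
  unfold blockOf labelsOf
  apply List.filterMap_congr
  intro g1 _
  simp only [Function.comp_apply, pairsOf_filter]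
  simp

theorem main_eq (ow : Int → Option Int) (pli2 : List (Int × List Int))
    (hnd : (pli2.map Prod.fst).Nodup) :
    ((PySem.Set.ofList ((pli2.flatMap (pairsOf ow)).map Prod.fst)).map
        (fun k => (k, ((pli2.flatMap (pairsOf ow)).filter (fun q => q.1 == k)).map (fun x => x.2)))).filter
      (fun kv => kv.2.length > 1)
    = pli2.flatMap (blockOf ow) := by
  induction pli2 with
  | nil => rfl
  | cons p rest ih =>
    rw [List.map_cons, List.nodup_cons] at hnd
    obtain ⟨hp, hrest⟩ := hnd
    rw [List.flatMap_cons, List.flatMap_cons, List.map_append, PySem.Set.ofList_append,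
      PySem.Set.update_eq_append_filter]
    -- disjointness: no key of the rest groups lies in the head key set
    have hdisj : ((PySem.Set.ofList ((rest.flatMap (pairsOf ow)).map Prod.fst)).filter
        (fun y => !(PySem.Set.ofList ((pairsOf ow p).map Prod.fst)).contains y))
        = PySem.Set.ofList ((rest.flatMap (pairsOf ow)).map Prod.fst) := by
      apply List.filter_eq_self.mpr
      intro k hk
      have hk2 : k.2 ∈ rest.map Prod.fst :=
        mem_flat_key_snd ow rest k ((PySem.Set.mem_ofList _ _).mp hk)
      simp only [PySem.Set.contains_eq_listContains, List.contains_eq_mem, Bool.not_eq_eq_eq_not,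
        Bool.not_true, decide_eq_false_iff_not]
      intro hmem
      have := mem_pairs_key_snd ow p k ((PySem.Set.mem_ofList _ _).mp hmem)
      exact hp (this ▸ hk2)
    rw [hdisj, List.map_append, List.filter_append]
    congr 1
    · -- head part
      have hpt : ∀ k ∈ PySem.Set.ofList ((pairsOf ow p).map Prod.fst),
          ((pairsOf ow p ++ rest.flatMap (pairsOf ow)).filter (fun q => q.1 == k)).map (fun x => x.2)
          = ((pairsOf ow p).filter (fun q => q.1 == k)).map (fun x => x.2) := by
        intro k hk
        rw [List.filter_append]
        have : (rest.flatMap (pairsOf ow)).filter (fun q => q.1 == k) = [] := by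
          apply List.filter_eq_nil_iff.mpr
          intro q hq
          have hq2 : q.1.2 ∈ rest.map Prod.fst :=
            mem_flat_key_snd ow rest q.1 (List.mem_map_of_mem hq)
          have hk2 : k.2 = p.1 := mem_pairs_key_snd ow p k ((PySem.Set.mem_ofList _ _).mp hk)
          intro hbe
          have h := eq_of_beq hbe
          rw [h, hk2] at hq2
          exact hp hq2
        rw [this, List.append_nil]
      rw [List.map_congr_left (fun k hk => by rw [hpt k hk])]
      exact head_block ow p
    · -- tail part
      have hpt : ∀ k ∈ PySem.Set.ofList ((rest.flatMap (pairsOf ow)).map Prod.fst),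
          ((pairsOf ow p ++ rest.flatMap (pairsOf ow)).filter (fun q => q.1 == k)).map (fun x => x.2)
          = ((rest.flatMap (pairsOf ow)).filter (fun q => q.1 == k)).map (fun x => x.2) := by
        intro k hk
        rw [List.filter_append]
        have hk2 : k.2 ∈ rest.map Prod.fst :=
          mem_flat_key_snd ow rest k ((PySem.Set.mem_ofList _ _).mp hk)
        have : (pairsOf ow p).filter (fun q => q.1 == k) = [] := by
          apply pairsOf_filter_ne
          intro h
          exact hp (h ▸ hk2)
        rw [this, List.nil_append]
      rw [List.map_congr_left (fun k hk => by rw [hpt k hk])]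
      exact ih hrest

theorem blockOf_eq_filter (ow : Int → Option Int) (p : Int × List Int) :
    blockOf ow p = ((labelsOf ow p.2).map
        (fun g1 => ((g1, p.1), p.2.filter (fun v => ow v == some g1)))).filter
      (fun kv => kv.2.length > 1) := by
  rw [filter_map_eq_filterMap]
  unfold blockOf
  apply List.filterMap_congr
  intro g1 _
  simp

theorem block_keys_nodup_one (ow : Int → Option Int) (p : Int × List Int) :
    ((blockOf ow p).map Prod.fst).Nodup := by
  rw [blockOf_eq_filter]
  apply List.Nodup.sublist (List.Sublist.map Prod.fst List.filter_sublist)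
  rw [List.map_map]
  refine (PySem.Set.nodup_ofList _).map ?_
  intro a b h
  exact (Prod.ext_iff.mp h).1

theorem mem_block_key_snd (ow : Int → Option Int) (p : Int × List Int) (k : Int × Int)
    (hk : k ∈ (blockOf ow p).map Prod.fst) : k.2 = p.1 := by
  rw [blockOf_eq_filter] at hk
  obtain ⟨e, he, rfl⟩ := List.mem_map.mp hk
  obtain ⟨g1, hg1, rfl⟩ := List.mem_map.mp (List.mem_of_mem_filter he)
  rfl

theorem mem_flat_block_snd (ow : Int → Option Int) (pli2 : List (Int × List Int)) (k : Int × Int)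
    (hk : k ∈ (pli2.flatMap (blockOf ow)).map Prod.fst) : k.2 ∈ pli2.map Prod.fst := by
  simp only [List.map_flatMap, List.mem_flatMap] at hk
  obtain ⟨p, hp, hkp⟩ := hk
  rw [mem_block_key_snd ow p k hkp]
  exact List.mem_map_of_mem hp

theorem block_keys_nodup (ow : Int → Option Int) (pli2 : List (Int × List Int))
    (hnd : (pli2.map Prod.fst).Nodup) :
    ((pli2.flatMap (blockOf ow)).map Prod.fst).Nodup := by
  induction pli2 with
  | nil => exact List.nodup_nil
  | cons p rest ih =>
    rw [List.map_cons, List.nodup_cons] at hnd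
    obtain ⟨hp, hrest⟩ := hnd
    rw [List.flatMap_cons, List.map_append]
    apply List.Nodup.append (block_keys_nodup_one ow p) (ih hrest)
    intro k hk1 hk2
    have h1 := mem_block_key_snd ow p k hk1
    have h2 := mem_flat_block_snd ow rest k hk2
    exact hp (h1 ▸ h2)

-- ===== VERDICT (by name: the statement is the Claim_ definition above) =====
theorem pli_intersection_optimized_spec : Claim_equal_pli_intersection_optimized := by
  intro pli1 pli2 _hdom hpre
  unfold Spec_pli_intersection_optimized
  obtain ⟨_hnd1, hnd2⟩ := hpre
  simp only [pli_intersection_optimized, pli_intersection_optimized_alt]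
  have hpt : ∀ v, (createProbingTable pli1).get? v = ownerB pli1 v := fun v => rfl
  rw [a_inter_eq pli1 pli2 (createProbingTable pli1) hpt, b_result_eq]
  have hBitems : ((pli2.flatMap (blockOf (ownerB pli1))).foldl
      (fun r e => r.insert e.1 e.2) PySem.Dict.empty).items
      = pli2.flatMap (blockOf (ownerB pli1)) := by
    rw [PySem.Dict.items_foldl_insert_fresh (pli2.flatMap (blockOf (ownerB pli1)))
      Prod.fst Prod.snd PySem.Dict.empty
      (fun a _ => PySem.Dict.contains_empty _)
      (block_keys_nodup (ownerB pli1) pli2 hnd2)]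
    simp [PySem.Dict.empty]
  rw [hBitems]
  set P := pli2.flatMap (pairsOf (ownerB pli1)) with hP
  set D := P.foldl (fun d q => d.modify q.1 [] (fun x => x ++ [q.2])) PySem.Dict.empty with hD
  have hkeys : D.keys = PySem.Set.ofList (P.map Prod.fst) := by
    rw [hD, PySem.Dict.keys_foldl_modify_key P Prod.fst [] (fun _ q => fun x => x ++ [q.2])
      PySem.Dict.empty]
    simp [PySem.Set.update_nil_left]
  have hnodup : D.keys.Nodup := by
    rw [hkeys]; exact PySem.Set.nodup_ofList _
  have hgetD : ∀ k, D.getD k [] = (P.filter (fun q => q.1 == k)).map (fun x => x.2) := by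
    intro k
    rw [hD, PySem.Dict.getD_foldl_modify_append P PySem.Dict.empty k]
    simp
  rw [PySem.Dict.items_eq_map_keys D hnodup [], hkeys]
  rw [List.map_congr_left (fun k (_ : k ∈ PySem.Set.ofList (P.map Prod.fst)) => by rw [hgetD k])]
  rw [main_eq (ownerB pli1) pli2 hnd2]
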